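-- pv_equiv track=rewrite | github.com/Ana-Maria-C/Python | lab2/ex4.py | sing
-- ===== SOURCE A (Python) =====
-- def sing(notes, moves, start_move):
--     melody = []
--     l = len(notes)
--     melody.append(notes[start_move % l])
--     for move in moves:
--         index = (start_move + move) % l
--         start_move = index
--         melody.append(notes[index])
--     return melody
-- ===== SOURCE B (Python) =====
-- def sing(notes, moves, start_move):
--     # Rotate the note list itself so that the current note is always at index 0,
--     # instead of maintaining a running index into a fixed list.
--     l = len(notes)
--     k = start_move % l
--     cur = notes[k:] + notes[:k]
--     melody = [cur[0]]
--     for move in moves: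
--         k = move % l
--         cur = cur[k:] + cur[:k]
--         melody.append(cur[0])
--     return melody
-- ===== Notes on version B (the rewrite author's own statement) =====
-- stated objective: alternative
-- what changed: Instead of A's running index walked through a fixed list, B rotates the note list itself each step (cur = cur[k:] + cur[:k] with k = move % l) and always reads element 0; correct because rotations compose additively modulo the length.
import Mathlib
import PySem

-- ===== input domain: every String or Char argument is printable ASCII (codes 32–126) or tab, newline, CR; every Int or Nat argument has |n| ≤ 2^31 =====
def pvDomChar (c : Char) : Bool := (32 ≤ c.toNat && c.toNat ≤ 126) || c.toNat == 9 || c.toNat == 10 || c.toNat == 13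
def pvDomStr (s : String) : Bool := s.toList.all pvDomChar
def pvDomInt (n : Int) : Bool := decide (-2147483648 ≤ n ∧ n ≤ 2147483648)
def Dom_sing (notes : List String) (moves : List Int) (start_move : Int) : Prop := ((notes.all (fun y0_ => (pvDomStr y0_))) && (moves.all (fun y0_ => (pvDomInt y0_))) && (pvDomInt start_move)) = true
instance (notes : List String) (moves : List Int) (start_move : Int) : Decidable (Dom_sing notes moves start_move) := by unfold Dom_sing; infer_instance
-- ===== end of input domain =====

-- B replaces A's running-index arithmetic by rotating the note list itself
-- (cur = cur[k:] + cur[:k]) and always reading element 0 (objective: alternative).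

-- ===== PORT A =====
def sing (notes : List String) (moves : List Int) (start_move : Int) : List String :=
  let l : Int := notes.length
  let melody : List String := [PySem.List.pyGetD notes (PySem.Int.mod start_move l) ""]
  (moves.foldl (fun (st : List String × Int) move =>
      let index := PySem.Int.mod (st.2 + move) l
      (st.1 ++ [PySem.List.pyGetD notes index ""], index)) (melody, start_move)).1

-- ===== PORT B =====
def sing_alt (notes : List String) (moves : List Int) (start_move : Int) : List String :=
  let l : Int := notes.length
  let k0 : Int := PySem.Int.mod start_move l
  let cur0 : List String :=
    PySem.List.slice notes (some k0) none ++ PySem.List.slice notes none (some k0)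
  let melody : List String := [PySem.List.pyGetD cur0 0 ""]
  (moves.foldl (fun (st : List String × List String) move =>
      let k : Int := PySem.Int.mod move l
      let cur := PySem.List.slice st.2 (some k) none ++ PySem.List.slice st.2 none (some k)
      (st.1 ++ [PySem.List.pyGetD cur 0 ""], cur)) (melody, cur0)).1

-- ===== PRECONDITION & SPEC =====
-- Pre_ excludes notes = [], on which both Pythons raise ZeroDivisionError at the first '% l'.
def Pre_sing (notes : List String) (_moves : List Int) (_start_move : Int) : Prop := notes ≠ []
instance (notes : List String) (moves : List Int) (start_move : Int) : Decidable (Pre_sing notes moves start_move) := by unfold Pre_sing; infer_instance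
def pvWitness_sing : List String × List Int × Int := (["C", "D", "E"], [1, -2, 4], 1)

def Spec_sing (notes : List String) (moves : List Int) (start_move : Int) (out : List String) : Prop := out = sing_alt notes moves start_move
instance (notes : List String) (moves : List Int) (start_move : Int) (out : List String) : Decidable (Spec_sing notes moves start_move out) := by unfold Spec_sing; infer_instance

-- ===== CLAIM (what is proved, stated in full; the proofs are below) =====
def Claim_equal_sing : Prop := ∀ (notes : List String) (moves : List Int) (start_move : Int), Dom_sing notes moves start_move → Pre_sing notes moves start_move → Spec_sing notes moves start_move (sing notes moves start_move)

-- ===== LEMMAS AND PROOFS =====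

/-- B's rotation step on a rotation of `notes` is again a rotation of `notes`. -/
theorem pvRotate_step {α : Type} (notes : List α) (a k : Nat)
    (hk : k < notes.length) :
    PySem.List.slice (notes.rotate a) (some (k : Int)) none
      ++ PySem.List.slice (notes.rotate a) none (some (k : Int))
      = notes.rotate (a + k) := by
  rw [PySem.List.slice_from_natCast, PySem.List.slice_to_natCast]
  have hk' : k ≤ (notes.rotate a).length := by rw [List.length_rotate]; omega
  rw [← List.rotate_eq_drop_append_take hk', List.rotate_rotate]

/-- The head of a rotation of a nonempty list, as Python reads it. -/
theorem pvRotate_head {α : Type} [Inhabited α] (notes : List α) (d : α) (a : Nat)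
    (ha : a < notes.length) :
    PySem.List.pyGetD (notes.rotate a) 0 d = notes[a] := by
  have h0 : 0 < (notes.rotate a).length := by rw [List.length_rotate]; omega
  rw [PySem.List.pyGetD_zero, List.getD_eq_getElem _ _ h0, List.getElem_rotate]
  congr 1
  simp [Nat.mod_eq_of_lt ha]

/-- Reading `notes` at a Python-mod index equals `notes[a]` for the matching Nat `a`. -/
theorem pvGetD_mod (notes : List String) (p : Int) (a : Nat)
    (ha : a < notes.length)
    (hpa : (a : Int) = PySem.Int.mod p (notes.length : Int)) :
    PySem.List.pyGetD notes (PySem.Int.mod p (notes.length : Int)) "" = notes[a] := by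
  rw [← hpa, PySem.List.pyGetD_natCast, List.getD_eq_getElem _ _ ha]

/-- The two mods agree along a step. -/
theorem pvMod_step (l : Int) (hl : 0 < l) (p m : Int) (a k : Nat)
    (hpa : (a : Int) = PySem.Int.mod p l) (hkm : (k : Int) = PySem.Int.mod m l) :
    (((a + k) % l.toNat : Nat) : Int) = PySem.Int.mod (p + m) l := by
  have hcast : ((l.toNat : Int)) = l := Int.toNat_of_nonneg (le_of_lt hl)
  rw [PySem.Int.mod_eq_emod_of_pos hl] at hpa hkm ⊢
  push_cast
  rw [hcast, hpa, hkm]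
  exact (Int.add_emod p m l).symm

/-- Python's mod is idempotent for a positive divisor. -/
theorem pvMod_idem {l a : Int} (hl : 0 < l) :
    PySem.Int.mod (PySem.Int.mod a l) l = PySem.Int.mod a l := by
  rw [PySem.Int.mod_eq_emod_of_pos hl, PySem.Int.mod_eq_emod_of_pos hl,
    Int.emod_emod_of_dvd a (dvd_refl l)]

/-- Main loop correspondence: A's index-walking fold equals B's rotation fold,
    when the current rotation amount `a` matches A's current position `p` mod l. -/
theorem pvLoop (notes : List String) (hne : 0 < notes.length) :
    ∀ (ms : List Int) (p : Int) (a : Nat) (mel : List String),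
    a < notes.length → (a : Int) = PySem.Int.mod p (notes.length : Int) →
    (ms.foldl (fun (st : List String × Int) move =>
        (st.1 ++ [PySem.List.pyGetD notes (PySem.Int.mod (st.2 + move) (notes.length : Int)) ""],
          PySem.Int.mod (st.2 + move) (notes.length : Int))) (mel, p)).1
      = (ms.foldl (fun (st : List String × List String) move =>
          (st.1 ++ [PySem.List.pyGetD (PySem.List.slice st.2 (some (PySem.Int.mod move (notes.length : Int))) none ++ PySem.List.slice st.2 none (some (PySem.Int.mod move (notes.length : Int)))) 0 ""],
            PySem.List.slice st.2 (some (PySem.Int.mod move (notes.length : Int))) none ++ PySem.List.slice st.2 none (some (PySem.Int.mod move (notes.length : Int))))) (mel, notes.rotate a)).1 := by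
  intro ms
  induction ms with
  | nil => intro p a mel _ _; rfl
  | cons m rest ih =>
    intro p a mel ha hpa
    have hl : 0 < ((notes.length : Int)) := by exact_mod_cast hne
    have hk0 : 0 ≤ PySem.Int.mod m (notes.length : Int) := PySem.Int.mod_nonneg _ hl
    have hkl : PySem.Int.mod m (notes.length : Int) < (notes.length : Int) := PySem.Int.mod_lt _ hl
    set k : Nat := (PySem.Int.mod m (notes.length : Int)).toNat with hkdef
    have hkm : (k : Int) = PySem.Int.mod m (notes.length : Int) := Int.toNat_of_nonneg hk0
    have hklt : k < notes.length := by omega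
    have ha' : (a + k) % notes.length < notes.length := Nat.mod_lt _ hne
    have hmod : (((a + k) % notes.length : Nat) : Int)
        = PySem.Int.mod (p + m) (notes.length : Int) := by
      have := pvMod_step (notes.length : Int) hl p m a k hpa hkm
      simpa using this
    simp only [List.foldl_cons]
    have hmod' : (((a + k) % notes.length : Nat) : Int)
        = PySem.Int.mod (PySem.Int.mod (p + m) (notes.length : Int)) (notes.length : Int) := by
      rw [pvMod_idem hl]; exact hmod
    rw [← hkm, pvRotate_step notes a k hklt, ← List.rotate_mod]
    rw [ih (PySem.Int.mod (p + m) (notes.length : Int)) ((a + k) % notes.length) _ ha' hmod']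
    congr 2
    rw [pvRotate_head notes "" _ ha', pvGetD_mod notes (p + m) _ ha' hmod]

/-- B's initial rotated list is `notes.rotate a0`. -/
theorem pvInit (notes : List String) (hne : 0 < notes.length) (start_move : Int) :
    PySem.List.slice notes (some (PySem.Int.mod start_move (notes.length : Int))) none
      ++ PySem.List.slice notes none (some (PySem.Int.mod start_move (notes.length : Int)))
      = notes.rotate (PySem.Int.mod start_move (notes.length : Int)).toNat := by
  have hl : 0 < ((notes.length : Int)) := by exact_mod_cast hne
  have h0 : 0 ≤ PySem.Int.mod start_move (notes.length : Int) := PySem.Int.mod_nonneg _ hl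
  have hlt : PySem.Int.mod start_move (notes.length : Int) < (notes.length : Int) :=
    PySem.Int.mod_lt _ hl
  have hcast : (((PySem.Int.mod start_move (notes.length : Int)).toNat : Int))
      = PySem.Int.mod start_move (notes.length : Int) := Int.toNat_of_nonneg h0
  rw [← hcast, PySem.List.slice_from_natCast, PySem.List.slice_to_natCast]
  exact (List.rotate_eq_drop_append_take (by omega)).symm

-- ===== VERDICT (by name: the statement is the Claim_ definition above) =====
theorem sing_spec : Claim_equal_sing := by
  intro notes moves start_move _ hpre
  have hne : 0 < notes.length := List.length_pos_iff.mpr hpre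
  have hl : 0 < ((notes.length : Int)) := by exact_mod_cast hne
  have h0 : 0 ≤ PySem.Int.mod start_move (notes.length : Int) := PySem.Int.mod_nonneg _ hl
  have hlt : PySem.Int.mod start_move (notes.length : Int) < (notes.length : Int) :=
    PySem.Int.mod_lt _ hl
  set a0 : Nat := (PySem.Int.mod start_move (notes.length : Int)).toNat with ha0def
  have ha0 : a0 < notes.length := by omega
  have ha0cast : (a0 : Int) = PySem.Int.mod start_move (notes.length : Int) :=
    Int.toNat_of_nonneg h0
  unfold Spec_sing
  simp only [sing, sing_alt]
  rw [pvInit notes hne start_move, ← ha0def]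
  rw [pvLoop notes hne moves start_move a0 _ ha0 ha0cast]
  congr 2
  rw [pvRotate_head notes "" a0 ha0, pvGetD_mod notes start_move a0 ha0 ha0cast]
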